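-- pv_equiv track=rewrite | github.com/mahmoudsalmi/aoc2021 | day8.py | clean_digits_maps
-- ===== SOURCE A (Python) =====
-- def char_to_segment(char):
--     return ord(char) - ord('a') + 1
--
-- def segment_to_pow2(segment):
--     return 1 << (7 - segment)
--
-- def segment_is_active(digit, segment):
--     return ((digit >> (7 - segment)) & 1) == 1
--
-- def count_segments(digit):
--     return len(list(filter(
--         lambda active: active,
--         map(lambda s: segment_is_active(digit, s), range(1, 8))
--     )))
--
-- DIGITS = [
--     0b_1_1_1_0_1_1_1,
--     0b_0_0_1_0_0_1_0,
--     0b_1_0_1_1_1_0_1,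
--     0b_1_0_1_1_0_1_1,
--     0b_0_1_1_1_0_1_0,
--     0b_1_1_0_1_0_1_1,
--     0b_1_1_0_1_1_1_1,
--     0b_1_0_1_0_0_1_0,
--     0b_1_1_1_1_1_1_1,
--     0b_1_1_1_1_0_1_1
-- ]
--
-- def disable_segment(digit, segment):
--     if digit & segment_to_pow2(segment) == 0:
--         return digit
--     return digit ^ segment_to_pow2(segment)
--
-- def calculate_remaining_segments(segments):
--     res = DIGITS
--     for segment in segments:
--         new_res = []
--         for digit in res:
--             new_res.append(disable_segment(digit, segment))
--         res = new_res
--     return list(map(count_segments, res))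
--
-- def clean_digits_maps(digits_map, segments):
--     remaining_segments = calculate_remaining_segments(list(map(char_to_segment, segments)))
--     d_map = []
--     for digit, digit_map in enumerate(digits_map):
--         d_map.append(list(
--             filter(lambda d, dig=digit: len(d) == remaining_segments[dig], digit_map)
--         ))
--     return d_map
-- ===== SOURCE B (Python) =====
-- DIGITS = [
--     0b1110111,
--     0b0010010,
--     0b1011101,
--     0b1011011,
--     0b0111010,
--     0b1101011,
--     0b1101111,
--     0b1010010,
--     0b1111111,
--     0b1111011,
-- ]
--
--
-- def clean_digits_maps(digits_map, segments):
--     mask = 0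
--     for char in segments:
--         mask |= 1 << (7 - (ord(char) - ord('a') + 1))
--     remaining = [bin(digit & ~mask).count('1') for digit in DIGITS]
--     return [[d for d in digit_map if len(d) == remaining[i]]
--             for i, digit_map in enumerate(digits_map)]
-- ===== Notes on version B (the rewrite author's own statement) =====
-- stated objective: simpler
-- what changed: Replaces the per-segment rebuilding of the ten-digit list (a fresh list per segment char, clearing one bit at a time, then a per-digit segment scan) by folding all segment chars into one bitmask and taking a popcount of DIGITS[d] & ~mask per digit; the output lists are built by comprehensions instead of append loops.
import Mathlib
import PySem

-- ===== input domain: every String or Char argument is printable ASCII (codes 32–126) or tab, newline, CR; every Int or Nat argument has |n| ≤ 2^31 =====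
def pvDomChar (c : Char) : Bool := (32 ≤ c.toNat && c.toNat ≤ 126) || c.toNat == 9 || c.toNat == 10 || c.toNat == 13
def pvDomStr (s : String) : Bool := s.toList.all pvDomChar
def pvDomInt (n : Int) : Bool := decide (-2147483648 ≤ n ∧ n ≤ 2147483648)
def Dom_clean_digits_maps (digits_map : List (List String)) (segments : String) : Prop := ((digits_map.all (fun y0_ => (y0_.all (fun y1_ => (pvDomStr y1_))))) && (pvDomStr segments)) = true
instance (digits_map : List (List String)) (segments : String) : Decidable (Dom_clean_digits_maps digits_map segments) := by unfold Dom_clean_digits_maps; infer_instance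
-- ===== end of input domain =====

-- B replaces A's per-segment rebuilding of the ten-digit list by a single OR-folded bitmask
-- plus one popcount per digit (objective: simpler; same filtering semantics, proved equal).


-- ===== PORT A =====
def char_to_segment (char : Char) : Int := (char.toNat : Int) - 97 + 1

-- Python's `1 << (7 - segment)` raises ValueError for segment ≥ 8 (negative shift);
-- those inputs are excluded by Pre_, so the `.toNat` clamp is never reached there.
def segment_to_pow2 (segment : Int) : Int := 1 <<< ((7 : Int) - segment).toNat

-- only called with segment ∈ 1..7, where the shift amount is a plain Nat
def segment_is_active (digit : Int) (segment : Int) : Bool :=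
  PySem.Int.band (digit >>> ((7 : Int) - segment).toNat) 1 == 1

def count_segments (digit : Int) : Int :=
  (((PySem.List.pyRange 1 8 1).map (fun s => segment_is_active digit s)).filter (fun a => a)).length

def DIGITS : List Int :=
  [0b1110111, 0b0010010, 0b1011101, 0b1011011, 0b0111010,
   0b1101011, 0b1101111, 0b1010010, 0b1111111, 0b1111011]

def disable_segment (digit : Int) (segment : Int) : Int :=
  if PySem.Int.band digit (segment_to_pow2 segment) == 0 then digit
  else PySem.Int.bxor digit (segment_to_pow2 segment)

def calculate_remaining_segments (segments : List Int) : List Int :=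
  let res := segments.foldl
    (fun res segment => res.foldl (fun new_res digit => new_res ++ [disable_segment digit segment]) [])
    DIGITS
  res.map count_segments

def clean_digits_maps (digits_map : List (List String)) (segments : String) : List (List String) :=
  let remaining := calculate_remaining_segments (segments.toList.map char_to_segment)
  (PySem.List.enumerate digits_map 0).foldl
    (fun d_map p => d_map ++ [p.2.filter (fun d => PySem.Str.len d == PySem.List.pyGetD remaining p.1 0)])
    []

-- ===== PORT B =====
def DIGITS_B : List Int :=
  [0b1110111, 0b0010010, 0b1011101, 0b1011011, 0b0111010,
   0b1101011, 0b1101111, 0b1010010, 0b1111111, 0b1111011]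

def clean_digits_maps_alt (digits_map : List (List String)) (segments : String) : List (List String) :=
  let mask : Int := segments.toList.foldl
    (fun m char => PySem.Int.bor m ((1 : Int) <<< ((7 : Int) - ((char.toNat : Int) - 97 + 1)).toNat)) 0
  -- `bin(x).count('1')` is `PySem.Str.count (PySem.Int.pyBin x) "1"`; Python's count is an int, hence the cast
  let remaining : List Int := DIGITS_B.map
    (fun digit => ((PySem.Str.count (PySem.Int.pyBin (PySem.Int.band digit (Int.not mask))) "1" : Nat) : Int))
  (PySem.List.enumerate digits_map 0).map
    (fun p => p.2.filter (fun d => PySem.Str.len d == PySem.List.pyGetD remaining p.1 0))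

-- ===== PRECONDITION & SPEC =====
-- Pre_ excludes exactly the inputs where Python A raises: a segment char ≥ 'h' makes
-- `1 << (7 - segment)` a negative shift (ValueError), and a nonempty digit map at an index ≥ 10
-- makes `remaining_segments[digit]` an IndexError (an empty map there never evaluates the lambda).
def Pre_clean_digits_maps (digits_map : List (List String)) (segments : String) : Prop :=
  ((segments.toList.all (fun c => c.toNat ≤ 103)) &&
   ((PySem.List.enumerate digits_map 0).all (fun p => !(decide (10 ≤ p.1)) || p.2.isEmpty))) = true
instance (digits_map : List (List String)) (segments : String) : Decidable (Pre_clean_digits_maps digits_map segments) := by unfold Pre_clean_digits_maps; infer_instance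

def pvWitness_clean_digits_maps : List (List String) × String := ([["ab", "abc"], ["x", "yz"]], "ab")

def Spec_clean_digits_maps (digits_map : List (List String)) (segments : String) (out : List (List String)) : Prop := out = clean_digits_maps_alt digits_map segments
instance (digits_map : List (List String)) (segments : String) (out : List (List String)) : Decidable (Spec_clean_digits_maps digits_map segments out) := by unfold Spec_clean_digits_maps; infer_instance

-- ===== CLAIM (what is proved, stated in full; the proofs are below) =====
def Claim_equal_clean_digits_maps : Prop := ∀ (digits_map : List (List String)) (segments : String), Dom_clean_digits_maps digits_map segments → Pre_clean_digits_maps digits_map segments → Spec_clean_digits_maps digits_map segments (clean_digits_maps digits_map segments)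

-- ===== LEMMAS AND PROOFS =====

-- bits of `d &&& m` and of `d.ldiff m` partition the bits of `d`
theorem pv_land_add_ldiff (d : Nat) : ∀ m : Nat, (d &&& m) + Nat.ldiff d m = d := by
  induction d using Nat.binaryRec with
  | zero => intro m; simp [Nat.ldiff, Nat.bitwise_zero_left]
  | bit a n ih =>
    intro m
    induction m using Nat.bitCasesOn with
    | bit b k =>
      rw [Nat.land_bit, Nat.ldiff_bit]
      have := ih k
      cases a <;> cases b <;> simp [Nat.bit_val] <;> omega

theorem pv_ldiff_eq_sub (d m : Nat) : Nat.ldiff d m = d - (d &&& m) := by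
  have := pv_land_add_ldiff d m; omega

theorem pv_ldiff_le (d m : Nat) : Nat.ldiff d m ≤ d := by
  have := pv_land_add_ldiff d m; omega

theorem pv_ldiff_zero (d : Nat) : Nat.ldiff d 0 = d := by
  apply Nat.eq_of_testBit_eq; intro i; simp

theorem pv_ldiff_ldiff (d m p : Nat) : Nat.ldiff (Nat.ldiff d m) p = Nat.ldiff d (m ||| p) := by
  apply Nat.eq_of_testBit_eq; intro i
  simp only [Nat.testBit_ldiff, Nat.testBit_lor]
  cases d.testBit i <;> cases m.testBit i <;> cases p.testBit i <;> rfl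

theorem pv_ldiff_two_pow (d k : Nat) :
    Nat.ldiff d (2 ^ k) = if d &&& 2 ^ k = 0 then d else d ^^^ 2 ^ k := by
  by_cases hb : d.testBit k = true
  · have hand : d &&& 2 ^ k = 2 ^ k := by rw [Nat.and_two_pow, hb]; simp
    have hne : ¬ (d &&& 2 ^ k = 0) := by rw [hand]; exact (Nat.two_pow_pos k).ne'
    rw [if_neg hne]
    apply Nat.eq_of_testBit_eq; intro i
    simp only [Nat.testBit_ldiff, Nat.testBit_xor, Nat.testBit_two_pow]
    by_cases hik : k = i
    · subst hik; simp [hb]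
    · simp [hik]
  · have hb' : d.testBit k = false := by simpa using hb
    have hand : d &&& 2 ^ k = 0 := by rw [Nat.and_two_pow, hb']; simp
    rw [if_pos hand]
    apply Nat.eq_of_testBit_eq; intro i
    simp only [Nat.testBit_ldiff, Nat.testBit_two_pow]
    by_cases hik : k = i
    · subst hik; simp [hb']
    · simp [hik]

theorem pv_one_shl (k : Nat) : (1 : Int) <<< k = ((2 ^ k : Nat) : Int) := by
  simp [Int.shiftLeft_eq]

theorem pv_band_not (d m : Nat) :
    PySem.Int.band (d : Int) (Int.not (m : Int)) = ((Nat.ldiff d m : Nat) : Int) := by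
  simp [PySem.Int.band, Int.not, pv_ldiff_eq_sub]

theorem pv_disable_cast (x : Nat) (s : Int) :
    disable_segment (x : Int) s = ((Nat.ldiff x (2 ^ (((7 : Int) - s).toNat)) : Nat) : Int) := by
  unfold disable_segment segment_to_pow2
  simp only [PySem.Int.band_natCast, PySem.Int.bxor_natCast, Nat.one_shiftLeft]
  rw [pv_ldiff_two_pow]
  by_cases h : x &&& 2 ^ (((7 : Int) - s).toNat) = 0 <;> simp [h]

theorem pv_mask_cast (l : List Int) : ∀ m : Nat,
    l.foldl (fun mm s => PySem.Int.bor mm ((1 : Int) <<< ((7 : Int) - s).toNat)) (m : Int)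
      = ((l.foldl (fun M s => M ||| 2 ^ (((7 : Int) - s).toNat)) m : Nat) : Int) := by
  induction l with
  | nil => intro m; rfl
  | cons s t ih =>
    intro m
    rw [List.foldl_cons, pv_one_shl, PySem.Int.bor_natCast]
    exact ih _

theorem pv_foldA_core (l : List Int) : ∀ (x m : Nat),
    l.foldl (fun d s => disable_segment d s) ((Nat.ldiff x m : Nat) : Int)
      = ((Nat.ldiff x (l.foldl (fun M s => M ||| 2 ^ (((7 : Int) - s).toNat)) m) : Nat) : Int) := by
  induction l with
  | nil => intro x m; rfl
  | cons s t ih =>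
    intro x m
    simp only [List.foldl_cons]
    rw [pv_disable_cast, pv_ldiff_ldiff]
    exact ih x _

theorem pv_count_popcount : ∀ y : Nat, y < 128 →
    count_segments (y : Int) = ((PySem.Str.count (PySem.Int.pyBin (y : Int)) "1" : Nat) : Int) := by
  decide

theorem pv_perdigit (l : List Int) (x : Nat) (hx : x < 128) :
    count_segments (l.foldl (fun d s => disable_segment d s) (x : Int))
      = ((PySem.Str.count (PySem.Int.pyBin (PySem.Int.band (x : Int)
          (Int.not (l.foldl (fun mm s => PySem.Int.bor mm ((1 : Int) <<< ((7 : Int) - s).toNat)) 0)))) "1" : Nat) : Int) := by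
  have h0 : ((0 : Int)) = ((0 : Nat) : Int) := rfl
  rw [h0, pv_mask_cast, pv_band_not]
  have hx0 : ((x : Nat) : Int) = ((Nat.ldiff x 0 : Nat) : Int) := by rw [pv_ldiff_zero]
  rw [hx0, pv_foldA_core]
  exact pv_count_popcount _ (lt_of_le_of_lt (pv_ldiff_le _ _) hx)

theorem pv_fold_map_swap (l : List Int) : ∀ X : List Int,
    l.foldl (fun res segment => res.map (fun d => disable_segment d segment)) X
      = X.map (fun d => l.foldl (fun d s => disable_segment d s) d) := by
  induction l with
  | nil => intro X; simp
  | cons s t ih =>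
    intro X
    simp only [List.foldl_cons, ih, List.map_map]
    rfl

theorem pv_main (digits_map : List (List String)) (segments : String) :
    clean_digits_maps digits_map segments = clean_digits_maps_alt digits_map segments := by
  unfold clean_digits_maps clean_digits_maps_alt
  have hinner : (fun (res : List Int) (segment : Int) =>
      res.foldl (fun new_res digit => new_res ++ [disable_segment digit segment]) ([] : List Int))
      = (fun res segment => res.map (fun d => disable_segment d segment)) := by
    funext res segment
    exact PySem.List.foldl_append_singleton_eq_map ..
  have hmask : segments.toList.foldl
      (fun m char => PySem.Int.bor m ((1 : Int) <<< ((7 : Int) - ((char.toNat : Int) - 97 + 1)).toNat)) 0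
      = (segments.toList.map char_to_segment).foldl
          (fun mm s => PySem.Int.bor mm ((1 : Int) <<< ((7 : Int) - s).toNat)) 0 := by
    rw [List.foldl_map]; rfl
  have hrem : calculate_remaining_segments (segments.toList.map char_to_segment)
      = DIGITS_B.map (fun digit => ((PySem.Str.count (PySem.Int.pyBin (PySem.Int.band digit
          (Int.not (segments.toList.foldl
            (fun m char => PySem.Int.bor m ((1 : Int) <<< ((7 : Int) - ((char.toNat : Int) - 97 + 1)).toNat)) 0)))) "1" : Nat) : Int)) := by
    unfold calculate_remaining_segments
    rw [hinner, pv_fold_map_swap, List.map_map, hmask]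
    have hDD : DIGITS_B = DIGITS := rfl
    rw [hDD]
    apply List.map_congr_left
    intro d hd
    fin_cases hd <;>
      exact pv_perdigit (segments.toList.map char_to_segment) _ (by norm_num)
  rw [hrem]
  exact PySem.List.foldl_append_singleton_eq_map ..

-- ===== VERDICT (by name: the statement is the Claim_ definition above) =====
theorem clean_digits_maps_spec : Claim_equal_clean_digits_maps := by
  intro digits_map segments _ _
  unfold Spec_clean_digits_maps
  exact pv_main digits_map segments
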